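-- pv_equiv track=rewrite | github.com/matryt/AdventOfCode | 2024/9/solution.py | find_none_blocks
-- ===== SOURCE A (Python) =====
-- def find_none_blocks(blocks_list, size) -> int:
-- 	counter = 0
-- 	for i, val in enumerate(blocks_list):
-- 		if val is None:
-- 			counter += 1
-- 			if counter == size:
-- 				return i - size + 1
-- 		else:
-- 			counter = 0
-- 	return -1
-- ===== SOURCE B (Python) =====
-- def find_none_blocks(blocks_list, size) -> int:
--     # Run-scanning with two pointers: find each maximal run of Nones, return its
--     # start index if its length reaches size, otherwise jump past the run.
--     # A run (length >= 1) can never satisfy size < 1's counter check, so bail early.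
--     if size < 1:
--         return -1
--     n = len(blocks_list)
--     i = 0
--     while i < n:
--         if blocks_list[i] is None:
--             j = i + 1
--             while j < n and blocks_list[j] is None:
--                 j += 1
--             if j - i >= size:
--                 return i
--             i = j
--         else:
--             i += 1
--     return -1
-- ===== Notes on version B (the rewrite author's own statement) =====
-- stated objective: alternative
-- what changed: Replaces the per-element counter scan with a run-scanning pass: detect each maximal run of Nones, return its start index if its length reaches size, otherwise skip past the whole run.
import Mathlib
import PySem

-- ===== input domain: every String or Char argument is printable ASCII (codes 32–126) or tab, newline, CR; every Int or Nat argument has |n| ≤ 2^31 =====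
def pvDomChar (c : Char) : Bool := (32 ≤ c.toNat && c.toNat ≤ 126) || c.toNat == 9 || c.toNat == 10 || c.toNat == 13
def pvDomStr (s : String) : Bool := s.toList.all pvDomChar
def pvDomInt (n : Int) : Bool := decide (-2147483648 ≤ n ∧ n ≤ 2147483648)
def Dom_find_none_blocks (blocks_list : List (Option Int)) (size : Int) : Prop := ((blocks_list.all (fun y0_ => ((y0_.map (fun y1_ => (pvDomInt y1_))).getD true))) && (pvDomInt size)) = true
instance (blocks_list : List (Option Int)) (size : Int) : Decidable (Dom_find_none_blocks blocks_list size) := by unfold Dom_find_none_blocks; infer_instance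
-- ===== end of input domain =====

-- B replaces A's per-element counter scan with a two-pointer run scan (same cost, different decomposition).


-- ===== PORT A =====
-- the for-loop over enumerate(blocks_list) with early return, state = (i, counter)
def goA (xs : List (Option Int)) (i counter size : Int) : Int :=
  match xs with
  | [] => -1
  | v :: t =>
    match v with
    | none =>
        let c := counter + 1
        if c = size then i - size + 1 else goA t (i + 1) c size
    | some _ => goA t (i + 1) 0 size

def find_none_blocks (blocks_list : List (Option Int)) (size : Int) : Int :=
  goA blocks_list 0 0 size

-- ===== PORT B =====
-- inner while of Source B: advance j past consecutive Nones (indices are Nat: 0 ≤ i, j in Source B)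
def runEnd (xs : List (Option Int)) (n j : Nat) : Nat :=
  if h : j < n ∧ PySem.List.pyGet? xs (j : Int) = some none then runEnd xs n (j + 1)
  else j
termination_by n - j
decreasing_by omega

-- needed by goB's termination proof (the outer while strictly advances i)
theorem runEnd_ge (xs : List (Option Int)) (n : Nat) : ∀ j, j ≤ runEnd xs n j := by
  intro j
  induction hn : n - j generalizing j with
  | zero =>
    rw [runEnd]
    split
    · omega
    · exact le_rfl
  | succ m ih =>
    rw [runEnd]
    split
    · have := ih (j + 1) (by omega); omega
    · exact le_rfl

-- outer while of Source B
def goB (xs : List (Option Int)) (n i : Nat) (size : Int) : Int :=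
  if hi : i < n then
    if PySem.List.pyGet? xs (i : Int) = some none then
      let j := runEnd xs n (i + 1)
      if (j : Int) - (i : Int) ≥ size then (i : Int)
      else goB xs n j size
    else goB xs n (i + 1) size
  else -1
termination_by n - i
decreasing_by
  · have := runEnd_ge xs n (i + 1); omega
  · omega

def find_none_blocks_alt (blocks_list : List (Option Int)) (size : Int) : Int :=
  if size < 1 then -1 else goB blocks_list blocks_list.length 0 size

-- ===== PRECONDITION & SPEC =====
def Spec_find_none_blocks (blocks_list : List (Option Int)) (size : Int) (out : Int) : Prop := out = find_none_blocks_alt blocks_list size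
instance (blocks_list : List (Option Int)) (size : Int) (out : Int) : Decidable (Spec_find_none_blocks blocks_list size out) := by unfold Spec_find_none_blocks; infer_instance

-- ===== CLAIM (what is proved, stated in full; the proofs are below) =====
def Claim_equal_find_none_blocks : Prop := ∀ (blocks_list : List (Option Int)) (size : Int), Dom_find_none_blocks blocks_list size → Spec_find_none_blocks blocks_list size (find_none_blocks blocks_list size)

-- ===== LEMMAS AND PROOFS =====

-- length of the leading run of Nones (proof-side abstraction of the inner while)
def noneRun (xs : List (Option Int)) : Nat :=
  match xs with
  | none :: t => noneRun t + 1
  | _ => 0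

-- proof-side list version of the outer while, consuming the remaining suffix
def goL (xs : List (Option Int)) (idx size : Int) : Int :=
  match xs with
  | [] => -1
  | some _ :: t => goL t (idx + 1) size
  | none :: t =>
      let run := noneRun t + 1
      if (run : Int) ≥ size then idx
      else goL (List.drop (noneRun t) t) (idx + (run : Int)) size
termination_by xs.length

-- for size ≤ 0 the counter (≥ 1 when tested) never equals size, so A yields -1
theorem goA_nonpos (xs : List (Option Int)) (i c size : Int) (hs : size ≤ 0) (hc : 0 ≤ c) :
    goA xs i c size = -1 := by
  induction xs generalizing i c with
  | nil => rfl
  | cons v t ih =>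
    cases v with
    | none =>
      simp only [goA]
      rw [if_neg (by omega)]
      exact ih (i + 1) (c + 1) (by omega)
    | some _ => exact ih (i + 1) 0 (by omega)

-- crossing a run of k Nones that does not complete the counter
theorem goA_run (k : Nat) (rest : List (Option Int)) (i c size : Int)
    (h : c + k < size) :
    goA (List.replicate k none ++ rest) i c size = goA rest (i + k) (c + k) size := by
  induction k generalizing i c with
  | zero => simp
  | succ k' ih =>
    simp only [List.replicate_succ, List.cons_append, goA]
    rw [if_neg (by push_cast at h ⊢; omega)]
    rw [ih (i + 1) (c + 1) (by push_cast at h ⊢; omega)]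
    congr 1 <;> push_cast <;> ring

-- inside a run of k Nones with c + k ≥ size the counter reaches size; A returns the run start i - c
theorem goA_hit (k : Nat) (rest : List (Option Int)) (i c size : Int)
    (h1 : size ≤ c + k) (h2 : c < size) :
    goA (List.replicate k none ++ rest) i c size = i - c := by
  induction k generalizing i c with
  | zero => simp at h1; omega
  | succ k' ih =>
    simp only [List.replicate_succ, List.cons_append, goA]
    by_cases hc : c + 1 = size
    · rw [if_pos hc]; omega
    · rw [if_neg hc]
      rw [ih (i + 1) (c + 1) (by push_cast at h1 ⊢; omega) (by omega)]
      omega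

theorem noneRun_decomp (xs : List (Option Int)) :
    List.replicate (noneRun xs) (none : Option Int) ++ List.drop (noneRun xs) xs = xs := by
  induction xs with
  | nil => rfl
  | cons v t ih =>
    cases v with
    | none => simp only [noneRun, List.replicate_succ, List.cons_append, List.drop_succ_cons]
              rw [ih]
    | some _ => rfl

-- after the leading None-run the next element (if any) is not None
theorem noneRun_drop (xs : List (Option Int)) :
    List.drop (noneRun xs) xs = [] ∨ ∃ v t, List.drop (noneRun xs) xs = some v :: t := by
  induction xs with
  | nil => left; rfl
  | cons v t ih =>
    cases v with
    | none => simpa [noneRun] using ih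
    | some w => right; exact ⟨w, t, rfl⟩

-- the inner while lands exactly past the None-run starting at j
theorem runEnd_eq (xs : List (Option Int)) : ∀ j, j ≤ xs.length →
    runEnd xs xs.length j = j + noneRun (List.drop j xs) := by
  intro j
  induction hn : xs.length - j generalizing j with
  | zero =>
    intro hj
    have hj' : j = xs.length := by omega
    rw [runEnd]
    rw [dif_neg (by omega)]
    simp [hj', noneRun]
  | succ m ih =>
    intro hj
    have hjlt : j < xs.length := by omega
    have hdrop : List.drop j xs = xs[j] :: List.drop (j + 1) xs :=
      List.drop_eq_getElem_cons hjlt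
    have hget : PySem.List.pyGet? xs (j : Int) = xs[j]? := PySem.List.pyGet?_natCast xs j
    rw [runEnd]
    by_cases hnone : xs[j] = none
    · rw [dif_pos ⟨hjlt, by rw [hget, List.getElem?_eq_getElem hjlt, hnone]⟩]
      rw [ih (j + 1) (by omega) (by omega), hdrop, hnone]
      simp [noneRun]
      omega
    · rw [dif_neg]
      · rw [hdrop]
        rcases hv : xs[j] with _ | v
        · exact absurd hv hnone
        · simp [noneRun]
      · rintro ⟨-, hc⟩
        rw [hget, List.getElem?_eq_getElem hjlt] at hc
        exact hnone (by injection hc)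

theorem noneRun_le (xs : List (Option Int)) : noneRun xs ≤ xs.length := by
  induction xs with
  | nil => simp [noneRun]
  | cons v t ih =>
    cases v with
    | none => simp only [noneRun, List.length_cons]; omega
    | some w => simp [noneRun]

theorem runEnd_le (xs : List (Option Int)) (j : Nat) (hj : j ≤ xs.length) :
    runEnd xs xs.length j ≤ xs.length := by
  rw [runEnd_eq xs j hj]
  have := noneRun_le (List.drop j xs)
  simp at this
  omega

-- the index version of the outer while equals the suffix-list version
theorem goB_eq_goL (xs : List (Option Int)) (m : Nat) : ∀ i, xs.length - i ≤ m → i ≤ xs.length → ∀ size,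
    goB xs xs.length i size = goL (List.drop i xs) (i : Int) size := by
  induction m with
  | zero =>
    intro i hn hi size
    have hi' : i = xs.length := by omega
    rw [goB, dif_neg (by omega)]
    simp [hi', goL]
  | succ m ih =>
    intro i hn hi size
    by_cases hend : i < xs.length
    case neg =>
      rw [goB, dif_neg (by omega)]
      have hi' : i = xs.length := by omega
      simp [hi', goL]
    have hilt : i < xs.length := hend
    have hdrop : List.drop i xs = xs[i] :: List.drop (i + 1) xs :=
      List.drop_eq_getElem_cons hilt
    have hget : PySem.List.pyGet? xs (i : Int) = xs[i]? := PySem.List.pyGet?_natCast xs i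
    rw [goB, dif_pos hilt]
    rcases hv : xs[i] with _ | v
    · -- current element is None: inner while computes the run
      rw [if_pos (by rw [hget, List.getElem?_eq_getElem hilt, hv])]
      rw [hdrop, hv]
      have hre : runEnd xs xs.length (i + 1) = i + 1 + noneRun (List.drop (i + 1) xs) :=
        runEnd_eq xs (i + 1) (by omega)
      set t := List.drop (i + 1) xs with ht
      simp only [goL]
      by_cases hge : ((noneRun t + 1 : Nat) : Int) ≥ size
      · rw [if_pos (by rw [hre]; push_cast at hge ⊢; omega)]
        rw [if_pos hge]
      · rw [if_neg (by rw [hre]; push_cast at hge ⊢; omega)]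
        rw [if_neg hge]
        have hje : runEnd xs xs.length (i + 1) = i + 1 + noneRun t := hre
        rw [hje]
        have hdd : List.drop (i + 1 + noneRun t) xs = List.drop (noneRun t) t := by
          rw [ht, List.drop_drop]
        rw [ih (i + 1 + noneRun t) (by
              have := runEnd_le xs (i + 1) (by omega); omega) (by
              have := runEnd_le xs (i + 1) (by omega)
              rw [hje] at this; omega), hdd]
        congr 1
        push_cast; ring
    · -- current element is not None: advance by one
      rw [if_neg (by rw [hget, List.getElem?_eq_getElem hilt, hv]; simp)]
      rw [hdrop, hv]
      simp only [goL]
      rw [ih (i + 1) (by omega) (by omega)]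
      norm_cast

-- A's counter scan equals the suffix-list run scan, for positive size
theorem main_equiv (n : Nat) : ∀ (xs : List (Option Int)), xs.length ≤ n →
    ∀ (i size : Int), 1 ≤ size → goA xs i 0 size = goL xs i size := by
  induction n with
  | zero =>
    intro xs hlen i size hs
    have : xs = [] := List.eq_nil_of_length_eq_zero (by omega)
    subst this; simp [goA, goL]
  | succ n ih =>
    intro xs hlen i size hs
    match xs with
    | [] => simp [goA, goL]
    | some v :: t =>
      simp only [goA, goL]
      exact ih t (by simpa using Nat.lt_succ_iff.mp (by simpa using hlen)) (i + 1) size hs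
    | none :: t =>
      have hlt : t.length ≤ n := by simpa using hlen
      simp only [goL]
      set k : Nat := noneRun t + 1 with hk
      have hdecomp : List.replicate k (none : Option Int) ++ List.drop (noneRun t) t = none :: t := by
        have := noneRun_decomp (none :: t)
        simpa [noneRun, hk] using this
      by_cases hge : (k : Int) ≥ size
      · rw [if_pos hge, ← hdecomp]
        rw [goA_hit k _ i 0 size (by omega) (by omega)]
        omega
      · rw [if_neg hge]
        have hrest := noneRun_drop (none :: t)
        have hdrop : List.drop (noneRun (none :: t)) (none :: t) = List.drop (noneRun t) t := by
          simp [noneRun]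
        rw [hdrop] at hrest
        conv_lhs => rw [← hdecomp]
        rw [goA_run k _ i 0 size (by omega)]
        rcases hrest with h0 | ⟨v, t', h0⟩
        · rw [h0]; simp [goA, goL]
        · rw [h0]
          simp only [goA, goL]
          have hlen' : t'.length ≤ n := by
            have hle : (List.drop (noneRun t) t).length ≤ t.length := by
              simp
            rw [h0] at hle
            simp at hle; omega
          exact ih t' hlen' (i + (k : Int) + 1) size hs

-- ===== VERDICT (by name: the statement is the Claim_ definition above) =====
theorem find_none_blocks_spec : Claim_equal_find_none_blocks := by
  intro xs size _
  unfold Spec_find_none_blocks find_none_blocks find_none_blocks_alt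
  by_cases hs : size < 1
  · rw [if_pos hs]; exact goA_nonpos xs 0 0 size (by omega) le_rfl
  · rw [if_neg hs]
    rw [goB_eq_goL xs xs.length 0 (by omega) (by omega) size]
    simpa using main_equiv xs.length xs le_rfl 0 size (by omega)
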